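-- pv_equiv track=rewrite | github.com/spfantasy/LeetCode | OA/luckyNumberQuerys.py | getLuckyNums
-- ===== SOURCE A (Python) =====
-- def getLuckyNums(maximum):
--     if maximum < 4:
--         return []
--     elif maximum < 7:
--         return [4]
--     else:
--         lists = [4,7]
--         ptr = 0
--         while True:
--             length = len(lists)
--             for i in range(ptr,length):
--                 if lists[i]*10 + 4 <= maximum:
--                     lists.append(lists[i]*10 + 4)
--                 if lists[i]*10 + 7 <= maximum:
--                     lists.append(lists[i]*10 + 7)
--             if len(lists) == length:
--                 break
--             ptr = length
--         return lists#sorted(lists)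
-- ===== SOURCE B (Python) =====
-- def _pats(w):
--     if w == 1:
--         return [4, 7]
--     return [p * 10 + d for p in _pats(w - 1) for d in (4, 7)]
--
-- def getLuckyNums(maximum):
--     res = []
--     w, low = 1, 4
--     while low <= maximum:
--         res += [n for n in _pats(w) if n <= maximum]
--         w += 1
--         low = low * 10 + 4
--     return res
-- ===== Notes on version B (the rewrite author's own statement) =====
-- stated objective: alternative
-- what changed: B replaces A's single growing BFS list with a read pointer by a per-digit-length decomposition: each level of lucky numbers (digits four and seven) is regenerated by a recursive product, filtered against maximum, and the loop stops once the smallest w-digit lucky number exceeds maximum.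
import Mathlib
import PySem

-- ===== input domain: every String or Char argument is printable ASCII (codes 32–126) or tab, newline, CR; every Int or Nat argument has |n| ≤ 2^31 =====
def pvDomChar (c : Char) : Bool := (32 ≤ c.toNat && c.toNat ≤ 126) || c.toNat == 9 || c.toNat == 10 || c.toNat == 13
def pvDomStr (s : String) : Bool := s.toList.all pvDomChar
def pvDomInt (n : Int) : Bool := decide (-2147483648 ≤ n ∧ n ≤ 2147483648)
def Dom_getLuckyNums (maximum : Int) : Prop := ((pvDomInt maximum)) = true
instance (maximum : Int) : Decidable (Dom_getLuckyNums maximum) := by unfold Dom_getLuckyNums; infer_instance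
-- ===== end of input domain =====

-- B regenerates each digit-length level by a fresh recursive product instead of A's
-- single growing BFS list with a read pointer (objective: alternative; same cost).

-- ===== PORT A =====
-- A's state (lists, ptr) is represented as acc = lists[:ptr] and frontier = lists[ptr:];
-- one outer while-iteration appends the conditional children of the frontier (aStep),
-- breaks when nothing was appended, and returns the whole list acc ++ frontier.
-- The `while True` loop is made total with a fuel counter that the equivalence proof
-- shows is never exhausted on the actual calls.
def aStep (maximum : Int) (frontier : List Int) : List Int :=
  frontier.foldl (fun nf x =>
    let nf2 := if x * 10 + 4 ≤ maximum then nf ++ [x * 10 + 4] else nf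
    if x * 10 + 7 ≤ maximum then nf2 ++ [x * 10 + 7] else nf2) []

def aLoop (maximum : Int) : Nat → List Int → List Int → List Int
  | 0, acc, frontier => acc ++ frontier
  | f + 1, acc, frontier =>
    let newF := aStep maximum frontier
    if newF.length = 0 then acc ++ frontier
    else aLoop maximum f (acc ++ frontier) newF

def getLuckyNums (maximum : Int) : List Int :=
  if maximum < 4 then []
  else if maximum < 7 then [4]
  else aLoop maximum maximum.toNat [] [4, 7]

-- ===== PORT B =====
-- literal port of Source B: _pats(w) recursively builds all w-digit 4/7 numbers in
-- ascending order; the main loop filters each level and stops once the smallest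
-- w-digit lucky number (low = 44…4) exceeds maximum.
def pats : Nat → List Int
  | 0 => []
  | 1 => [4, 7]
  | w + 2 => (pats (w + 1)).flatMap (fun p => [p * 10 + 4, p * 10 + 7])

def altLoop (maximum : Int) (res : List Int) (w low : Nat) : List Int :=
  if (low : Int) ≤ maximum then
    altLoop maximum (res ++ (pats w).filter (fun n => n ≤ maximum)) (w + 1) (low * 10 + 4)
  else res
termination_by maximum.toNat + 1 - low
decreasing_by
  rename_i h
  omega

def getLuckyNums_alt (maximum : Int) : List Int := altLoop maximum [] 1 4

-- ===== PRECONDITION & SPEC =====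
def Spec_getLuckyNums (maximum : Int) (out : List Int) : Prop := out = getLuckyNums_alt maximum
instance (maximum : Int) (out : List Int) : Decidable (Spec_getLuckyNums maximum out) := by unfold Spec_getLuckyNums; infer_instance

-- ===== CLAIM (what is proved, stated in full; the proofs are below) =====
def Claim_equal_getLuckyNums : Prop := ∀ (maximum : Int), Dom_getLuckyNums maximum → Spec_getLuckyNums maximum (getLuckyNums maximum)

-- ===== LEMMAS AND PROOFS =====
-- lowv w = the w-digit repunit of 4s (the smallest w-digit lucky number); lowv 0 = 0.
def lowv : Nat → Nat
  | 0 => 0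
  | n + 1 => 10 * lowv n + 4

theorem lowv_pos (n : Nat) : 4 ≤ lowv (n + 1) := by simp [lowv]

theorem pats_lb : ∀ n, ∀ x ∈ pats (n + 1), (lowv (n + 1) : Int) ≤ x := by
  intro n
  induction n with
  | zero => intro x hx; simp [pats, lowv] at hx ⊢; rcases hx with h | h <;> omega
  | succ k ih =>
    intro x hx
    simp only [pats, List.mem_flatMap] at hx
    obtain ⟨p, hp, hx⟩ := hx
    have := ih p hp
    simp only [lowv] at this ⊢
    simp at hx
    rcases hx with h | h <;> omega

theorem pats_head : ∀ n, ∃ t, pats (n + 1) = (lowv (n + 1) : Int) :: t := by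
  intro n
  induction n with
  | zero => exact ⟨[7], by simp [pats, lowv]⟩
  | succ k ih =>
    obtain ⟨t, ht⟩ := ih
    refine ⟨[(lowv (k+1) : Int) * 10 + 7] ++ t.flatMap (fun p => [p * 10 + 4, p * 10 + 7]), ?_⟩
    simp [pats, ht, lowv]
    ring

theorem filter_pats_nil (n : Nat) (m : Int) (h : m < (lowv (n + 1) : Int)) :
    (pats (n + 1)).filter (fun x => x ≤ m) = [] := by
  rw [List.filter_eq_nil_iff]
  intro x hx
  have := pats_lb n x hx
  simp; omega

theorem filter_pats_ne_nil (n : Nat) (m : Int) (h : (lowv (n + 1) : Int) ≤ m) :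
    (pats (n + 1)).filter (fun x => x ≤ m) ≠ [] := by
  obtain ⟨t, ht⟩ := pats_head n
  rw [ht]
  simp [h]

theorem aStep_acc (m : Int) (fr acc : List Int) :
    fr.foldl (fun nf x =>
      let nf2 := if x * 10 + 4 ≤ m then nf ++ [x * 10 + 4] else nf
      if x * 10 + 7 ≤ m then nf2 ++ [x * 10 + 7] else nf2) acc
    = acc ++ fr.flatMap (fun x =>
        (if x * 10 + 4 ≤ m then [x * 10 + 4] else []) ++
        (if x * 10 + 7 ≤ m then [x * 10 + 7] else [])) := by
  induction fr generalizing acc with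
  | nil => simp
  | cons y ys ih =>
    simp only [List.foldl_cons, List.flatMap_cons, ih]
    split_ifs <;> simp

theorem aStep_eq (m : Int) (fr : List Int) :
    aStep m fr = fr.flatMap (fun x =>
      (if x * 10 + 4 ≤ m then [x * 10 + 4] else []) ++
      (if x * 10 + 7 ≤ m then [x * 10 + 7] else [])) := by
  simpa [aStep] using aStep_acc m fr []

-- filtering the parents first does not change the filtered children, because every
-- child of a parent above the bound is itself above the bound (parents are ≥ 4)
theorem step_aux (m : Int) (l : List Int) (hl : ∀ y ∈ l, (4 : Int) ≤ y) :
    (l.filter (fun x => x ≤ m)).flatMap (fun x =>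
      (if x * 10 + 4 ≤ m then [x * 10 + 4] else []) ++
      (if x * 10 + 7 ≤ m then [x * 10 + 7] else []))
    = (l.flatMap (fun p => [p * 10 + 4, p * 10 + 7])).filter (fun x => x ≤ m) := by
  induction l with
  | nil => simp
  | cons y ys ih =>
    have hy4 : (4 : Int) ≤ y := hl y (by simp)
    have ihy := ih (fun z hz => hl z (List.mem_cons_of_mem _ hz))
    by_cases hy : y ≤ m
    · simp only [List.filter_cons, List.flatMap_cons, decide_eq_true_eq, if_pos hy,
        List.filter_append, ihy]
      congr 1
      split_ifs <;> simp_all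
    · simp only [List.filter_cons, List.flatMap_cons, decide_eq_true_eq, if_neg hy,
        List.filter_append, ihy]
      have h4 : ¬ (y * 10 + 4 ≤ m) := by omega
      have h7 : ¬ (y * 10 + 7 ≤ m) := by omega
      simp [h4, h7]

theorem pats_ge4 (n : Nat) : ∀ y ∈ pats (n + 1), (4 : Int) ≤ y := by
  intro y hy
  have h1 := pats_lb n y hy
  have h2 := lowv_pos n
  have : (4 : Int) ≤ (lowv (n + 1) : Int) := by exact_mod_cast h2
  omega

theorem aStep_filter (m : Int) (n : Nat) :
    aStep m ((pats (n + 1)).filter (fun x => x ≤ m))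
      = (pats (n + 2)).filter (fun x => x ≤ m) := by
  rw [aStep_eq]
  show _ = ((pats (n+1)).flatMap (fun p => [p * 10 + 4, p * 10 + 7])).filter (fun x => x ≤ m)
  exact step_aux m (pats (n + 1)) (pats_ge4 n)

theorem lowv_toInt_gt (m : Int) (n f : Nat) (h : m.toNat + 1 ≤ lowv (n + 1) + f) (hf : f = 0) :
    m < (lowv (n + 1) : Int) := by
  have h2 := lowv_pos n
  omega

-- main loop correspondence: with enough fuel, A's level loop on the filtered level
-- n+1 frontier agrees with B's per-length loop started at width n+1
theorem main_loop (m : Int) : ∀ f n acc, m.toNat + 1 ≤ lowv (n + 1) + f →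
    aLoop m f acc ((pats (n + 1)).filter (fun x => x ≤ m))
      = altLoop m acc (n + 1) (lowv (n + 1)) := by
  intro f
  induction f with
  | zero =>
    intro n acc h
    have hgt : m < (lowv (n + 1) : Int) := lowv_toInt_gt m n 0 h rfl
    rw [filter_pats_nil n m hgt, altLoop]
    simp [aLoop]
    omega
  | succ f ih =>
    intro n acc h
    by_cases hle : (lowv (n + 1) : Int) ≤ m
    · rw [aLoop]
      simp only [aStep_filter m n]
      rw [altLoop, if_pos hle]
      by_cases hnil : (pats (n + 2)).filter (fun x => x ≤ m) = []
      · rw [if_pos (by simp [hnil])]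
        have hgt2 : ¬ ((lowv (n + 2) : Int) ≤ m) := fun hc => filter_pats_ne_nil (n + 1) m hc hnil
        rw [altLoop, if_neg (by simpa [lowv, Nat.mul_comm] using hgt2)]
      · rw [if_neg (by simpa using hnil)]
        have hlow : lowv (n + 1) * 10 + 4 = lowv (n + 2) := by simp [lowv]; ring
        rw [hlow]
        apply ih (n + 1)
        have hstep : lowv (n + 1) + 1 ≤ lowv (n + 1 + 1) := by
          have := lowv_pos n
          simp [lowv]; omega
        omega
    · have hgt : m < (lowv (n + 1) : Int) := by omega
      rw [filter_pats_nil n m hgt, altLoop]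
      simp [aLoop, aStep]
      omega

-- ===== VERDICT (by name: the statement is the Claim_ definition above) =====
theorem getLuckyNums_spec : Claim_equal_getLuckyNums := by
  intro maximum _
  unfold Spec_getLuckyNums getLuckyNums getLuckyNums_alt
  by_cases h4 : maximum < 4
  · rw [if_pos h4, altLoop, if_neg (by omega)]
  · rw [if_neg h4]
    by_cases h7 : maximum < 7
    · rw [if_pos h7, altLoop, if_pos (by omega)]
      have hp : (pats 1).filter (fun n => n ≤ maximum) = [4] := by
        simp [pats, List.filter_cons]
        split_ifs <;> first | rfl | omega
      rw [hp, altLoop, if_neg (by norm_num; omega)]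
      simp
    · rw [if_neg h7]
      have hfr : ([4, 7] : List Int) = (pats 1).filter (fun x => x ≤ maximum) := by
        simp [pats, List.filter_cons]
        split_ifs <;> first | rfl | omega
      have hl1 : lowv 1 = 4 := by simp [lowv]
      have := main_loop maximum maximum.toNat 0 [] (by rw [hl1]; omega)
      rw [hfr]
      rw [this, hl1]
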